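-- pv_equiv track=rewrite | github.com/Alexiuyu/VerbsTraining | app.py | validar_respuesta
-- ===== SOURCE A (Python) =====
-- def validar_respuesta(respuesta_usuario, respuesta_correcta):
--     respuesta_usuario = respuesta_usuario.lower().strip()
--     respuesta_correcta = respuesta_correcta.lower()
--
--     # ✅ COINCIDENCIA EXACTA (caso general)
--     if respuesta_usuario == respuesta_correcta:
--         return True
--
--     # ⚠️ CASO ESPECIAL: "was/were" debe escribirse LITERALMENTE
--     if respuesta_correcta == "was/were":
--         return False
--
--     # ✅ CASO ESPECIAL: "gotten/got" acepta también solo "got"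
--     if respuesta_correcta == "gotten/got" and respuesta_usuario == "got":
--         return True
--
--     # ✅ Para otras respuestas con "/" como "learnt/learned" o "shone/shined", aceptar cualquiera
--     if "/" in respuesta_correcta:
--         opciones = [opcion.strip() for opcion in respuesta_correcta.split("/")]
--         if respuesta_usuario in opciones:
--             return True
--
--     return False
-- ===== SOURCE B (Python) =====
-- def validar_respuesta(respuesta_usuario, respuesta_correcta):
--     respuesta_usuario = respuesta_usuario.lower().strip()
--     respuesta_correcta = respuesta_correcta.lower()
--     # build the full set of acceptable answers, then do one membership test
--     acepta = {respuesta_correcta}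
--     if respuesta_correcta != "was/were" and "/" in respuesta_correcta:
--         for opcion in respuesta_correcta.split("/"):
--             acepta.add(opcion.strip())
--     return respuesta_usuario in acepta
-- ===== Notes on version B (the rewrite author's own statement) =====
-- stated objective: simpler
-- what changed: B builds the set of all acceptable normalized answers up front (the correct form plus, unless it is 'was/were', every stripped '/'-option, which subsumes the separate 'gotten/got' special case) and returns a single membership test, replacing A's chain of early-return special cases.
import Mathlib
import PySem

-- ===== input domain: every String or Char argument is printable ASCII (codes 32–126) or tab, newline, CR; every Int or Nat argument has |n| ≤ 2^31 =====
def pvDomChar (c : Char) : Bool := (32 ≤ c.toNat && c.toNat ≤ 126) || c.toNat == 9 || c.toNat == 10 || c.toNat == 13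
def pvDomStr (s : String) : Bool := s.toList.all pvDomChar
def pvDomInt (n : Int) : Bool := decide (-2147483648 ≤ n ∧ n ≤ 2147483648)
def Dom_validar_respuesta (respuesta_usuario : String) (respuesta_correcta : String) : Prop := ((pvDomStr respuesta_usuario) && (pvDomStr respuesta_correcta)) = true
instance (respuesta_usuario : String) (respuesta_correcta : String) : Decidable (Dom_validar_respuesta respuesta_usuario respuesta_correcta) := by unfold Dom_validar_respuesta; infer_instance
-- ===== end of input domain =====

-- B replaces A's chain of early-return special cases by building the set of acceptable
-- normalized answers once and doing a single membership test (objective: simpler).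

-- ===== PORT A =====
def validar_respuesta (respuesta_usuario : String) (respuesta_correcta : String) : Bool :=
  let ru := PySem.Str.strip (PySem.Str.lower respuesta_usuario)
  let rc := PySem.Str.lower respuesta_correcta
  if ru == rc then true
  else if rc == "was/were" then false
  else if rc == "gotten/got" && ru == "got" then true
  else if PySem.Str.isIn "/" rc then
    -- sep "/" ≠ "", so split? is always `some`: getD [] is exact here
    let opciones := ((PySem.Str.split? rc "/").getD []).map PySem.Str.strip
    if List.contains opciones ru then true
    else false
  else false

-- ===== PORT B =====
def validar_respuesta_alt (respuesta_usuario : String) (respuesta_correcta : String) : Bool :=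
  let ru := PySem.Str.strip (PySem.Str.lower respuesta_usuario)
  let rc := PySem.Str.lower respuesta_correcta
  let acepta : PySem.Set String := PySem.Set.ofList [rc]
  let acepta :=
    if rc != "was/were" && PySem.Str.isIn "/" rc then
      ((PySem.Str.split? rc "/").getD []).foldl (fun s o => PySem.Set.add s (PySem.Str.strip o)) acepta
    else acepta
  PySem.Set.contains acepta ru

-- ===== PRECONDITION & SPEC =====
def Spec_validar_respuesta (respuesta_usuario : String) (respuesta_correcta : String) (out : Bool) : Prop := out = validar_respuesta_alt respuesta_usuario respuesta_correcta
instance (respuesta_usuario : String) (respuesta_correcta : String) (out : Bool) : Decidable (Spec_validar_respuesta respuesta_usuario respuesta_correcta out) := by unfold Spec_validar_respuesta; infer_instance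

-- ===== CLAIM (what is proved, stated in full; the proofs are below) =====
def Claim_equal_validar_respuesta : Prop := ∀ (respuesta_usuario : String) (respuesta_correcta : String), Dom_validar_respuesta respuesta_usuario respuesta_correcta → Spec_validar_respuesta respuesta_usuario respuesta_correcta (validar_respuesta respuesta_usuario respuesta_correcta)

-- ===== LEMMAS AND PROOFS =====

-- B's membership test, characterised as a proposition
theorem alt_true_iff (ru rc : String) :
    validar_respuesta_alt ru rc = true ↔
      (PySem.Str.strip (PySem.Str.lower ru) = PySem.Str.lower rc ∨
       ((PySem.Str.lower rc ≠ "was/were" ∧ PySem.Str.isIn "/" (PySem.Str.lower rc) = true) ∧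
        PySem.Str.strip (PySem.Str.lower ru) ∈
          ((PySem.Str.split? (PySem.Str.lower rc) "/").getD []).map PySem.Str.strip)) := by
  unfold validar_respuesta_alt
  dsimp only
  set u := PySem.Str.strip (PySem.Str.lower ru) with hu
  set c := PySem.Str.lower rc with hc
  by_cases hg : c ≠ "was/were" ∧ PySem.Str.isIn "/" c = true
  · have h1 : (c != "was/were") = true := bne_iff_ne.2 hg.1
    have hb : (c != "was/were" && PySem.Str.isIn "/" c) = true := by
      rw [hg.2, h1]
      decide
    rw [if_pos hb, PySem.Set.contains_iff, PySem.Set.mem_foldl_add]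
    simp only [PySem.Set.mem_ofList, List.mem_singleton, List.mem_map]
    constructor
    · rintro (h | ⟨b, hb', he⟩)
      · exact Or.inl h
      · exact Or.inr ⟨hg, b, hb', he.symm⟩
    · rintro (h | ⟨_, b, hb', he⟩)
      · exact Or.inl h
      · exact Or.inr ⟨b, hb', he.symm⟩
  · have hb : (c != "was/were" && PySem.Str.isIn "/" c) = false := by
      rcases not_and_or.1 hg with h | h
      · have he : c = "was/were" := not_not.1 h
        rw [he]
        decide
      · rw [Bool.eq_false_iff.2 h, Bool.and_false]
    rw [hb, if_neg Bool.false_ne_true, PySem.Set.contains_iff]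
    simp only [PySem.Set.mem_ofList, List.mem_singleton]
    constructor
    · exact Or.inl
    · rintro (h | ⟨h, _⟩)
      · exact h
      · exact absurd h hg

-- A, characterised as the same proposition
theorem a_true_iff (ru rc : String) :
    validar_respuesta ru rc = true ↔
      (PySem.Str.strip (PySem.Str.lower ru) = PySem.Str.lower rc ∨
       ((PySem.Str.lower rc ≠ "was/were" ∧ PySem.Str.isIn "/" (PySem.Str.lower rc) = true) ∧
        PySem.Str.strip (PySem.Str.lower ru) ∈
          ((PySem.Str.split? (PySem.Str.lower rc) "/").getD []).map PySem.Str.strip)) := by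
  unfold validar_respuesta
  set u := PySem.Str.strip (PySem.Str.lower ru) with hu
  set c := PySem.Str.lower rc with hc
  by_cases h1 : u = c
  · rw [if_pos (beq_iff_eq.2 h1)]
    exact ⟨fun _ => Or.inl h1, fun _ => rfl⟩
  · rw [if_neg (by simp [h1])]
    by_cases h2 : c = "was/were"
    · rw [if_pos (beq_iff_eq.2 h2)]
      constructor
      · exact fun h => absurd h Bool.false_ne_true
      · rintro (h | ⟨⟨hne, _⟩, _⟩)
        · exact absurd h h1
        · exact absurd h2 hne
    · rw [if_neg (by simp [h2])]
      by_cases h3 : c = "gotten/got" ∧ u = "got"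
      · rw [if_pos (by rw [beq_iff_eq.2 h3.1, beq_iff_eq.2 h3.2]; rfl)]
        constructor
        · intro _
          refine Or.inr ⟨⟨h2, ?_⟩, ?_⟩
          · rw [h3.1]; decide
          · rw [h3.1, h3.2]; decide
        · exact fun _ => rfl
      · have hb : ((c == "gotten/got") && (u == "got")) = false := by
          rcases not_and_or.1 h3 with h | h
          · simp [h]
          · simp [h]
        rw [hb, if_neg Bool.false_ne_true]
        by_cases h4 : PySem.Str.isIn "/" c = true
        · rw [if_pos h4]
          by_cases h5 : u ∈ ((PySem.Str.split? c "/").getD []).map PySem.Str.strip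
          · rw [if_pos (List.contains_iff_mem.2 h5)]
            exact ⟨fun _ => Or.inr ⟨⟨h2, h4⟩, h5⟩, fun _ => rfl⟩
          · rw [if_neg (by simp [h5])]
            constructor
            · exact fun h => absurd h Bool.false_ne_true
            · rintro (h | ⟨_, h⟩)
              · exact absurd h h1
              · exact absurd h h5
        · rw [if_neg h4]
          constructor
          · exact fun h => absurd h Bool.false_ne_true
          · rintro (h | ⟨⟨_, h⟩, _⟩)
            · exact absurd h h1
            · exact absurd h h4

-- ===== VERDICT (by name: the statement is the Claim_ definition above) =====
theorem validar_respuesta_spec : Claim_equal_validar_respuesta := by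
  intro ru rc _
  show validar_respuesta ru rc = validar_respuesta_alt ru rc
  rw [← Bool.coe_iff_coe, a_true_iff, alt_true_iff]
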